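-- pv_equiv track=rewrite | github.com/ZOOEEER/CHEMDNER | Sentence.py | _posGatherStar
-- ===== SOURCE A (Python) =====
-- def _posGatherStar(posgather):
--     '''
--     长单词聚合。
--
--     '''
--     # 分词
--     word_boundaries = ' '
--     sentence_boundaries = ',.'
--     splits = []
--     bl_in_word = False
--     for i, pg in enumerate(posgather):
--         pos = pg[0]
--         len_pos = pg[1]
--         if pos in word_boundaries or \
--                 (pos in sentence_boundaries and \
--                  ( i+1 == len(posgather) or posgather[i+1][0] in word_boundaries )):
--             splits.append(i)
--             bl_in_word = False
--         elif not bl_in_word: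
--             splits.append(i)
--             bl_in_word = True
--     splits.append(len(posgather))
--     # 确定POS标签
--     # left_brackets = '([{'
--     # right_brackets = ')]}'
--     # brackets = left_brackets + right_brackets
--     # deleted_symbols = brackets
--     deleted_symbols = [] # 不删除任何symbols
--     posgatherStar = []
--     for start, end in zip(splits[:-1], splits[1:]):
--         # 处理括号等删除符号
--         if end - start == 1:
--             pos, len_pos = posgather[start]
--         else:
--             ds_indexes = []
--             for pos_i in range(start, end):
--                 if posgather[pos_i][0] in deleted_symbols:
--                     ds_indexes.append(pos_i)
--             if len(ds_indexes) == 0: # <=2的旁路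
--                 if end - start <= 2:
--                     posgatherStar.extend(posgather[start:end])
--                     continue
--             if end - start - len(ds_indexes) <= 1:
--                 assert len([ p for p, _ in posgather[start:end] if p not in deleted_symbols ]) <= 1, \
--                     '{'+'start:{}, end:{}, ds_indexes:{}, posgather:{}'.format(start, end, ds_indexes, posgather)+'}'
--                 if end - start - len(ds_indexes) == 0:
--                     pos = 'DEL'
--                 else:
--                     pos = [ p for p, _ in posgather[start:end] if p not in deleted_symbols ][0]
--             else:
--                 pos = str(end - start - len(ds_indexes))
--             len_pos = sum([ len_pos for _, len_pos in posgather[start:end] ])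
--         posgatherStar.append((pos, len_pos))
--     return posgatherStar
-- ===== SOURCE B (Python) =====
-- def _posGatherStar(posgather):
--     '''Single forward pass maintaining the current word's token group; no splits index list.'''
--     n = len(posgather)
--
--     def is_boundary(i):
--         pos = posgather[i][0]
--         return pos in ' ' or (pos in ',.' and (i + 1 == n or posgather[i + 1][0] in ' '))
--
--     def emit(group):
--         if len(group) <= 2:
--             return group
--         return [(str(len(group)), sum(l for _, l in group))]
--
--     out = []
--     group = []
--     for i in range(n):
--         if is_boundary(i):
--             out.extend(emit(group))
--             group = []
--             out.append(posgather[i])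
--         else:
--             group.append(posgather[i])
--     out.extend(emit(group))
--     return out
-- ===== Notes on version B (the rewrite author's own statement) =====
-- stated objective: simpler
-- what changed: Replaces A's two-phase structure (build a 'splits' index list with a bl_in_word flag, then zip consecutive split pairs and re-slice/re-scan each segment with dead deleted-symbols machinery) by a single forward pass that accumulates the current word's tokens in a running group and flushes it at each boundary.
import Mathlib
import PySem

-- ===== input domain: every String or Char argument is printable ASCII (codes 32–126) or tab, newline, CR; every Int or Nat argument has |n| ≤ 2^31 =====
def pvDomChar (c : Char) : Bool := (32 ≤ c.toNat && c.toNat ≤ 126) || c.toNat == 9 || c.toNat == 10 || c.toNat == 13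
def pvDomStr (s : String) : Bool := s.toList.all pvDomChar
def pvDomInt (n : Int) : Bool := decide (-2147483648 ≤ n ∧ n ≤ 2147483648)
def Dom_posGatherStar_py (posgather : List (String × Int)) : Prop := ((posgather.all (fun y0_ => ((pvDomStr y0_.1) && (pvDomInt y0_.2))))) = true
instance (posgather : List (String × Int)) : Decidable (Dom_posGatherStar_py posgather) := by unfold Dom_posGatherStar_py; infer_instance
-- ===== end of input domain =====

-- B replaces A's build-splits-then-zip two-phase structure by a single forward pass that
-- accumulates the current word's tokens and flushes them at each boundary (objective: simpler).

-- ===== PORT A =====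
-- deleted_symbols = []  (the source keeps it as an empty list)
def pvDeletedSymbols : List String := []

-- body of A's first loop (over enumerate(posgather)); state = (splits, bl_in_word)
def stepA (posgather : List (String × Int)) (st : List Int × Bool)
    (ipg : Int × (String × Int)) : List Int × Bool :=
  let pos := ipg.2.1
  if PySem.Str.isIn pos " " ||
     (PySem.Str.isIn pos ",." &&
       ((ipg.1 + 1 == (posgather.length : Int)) ||
        -- posgather[i+1][0]: evaluation is guarded by the i+1 == len(posgather) test
        PySem.Str.isIn (PySem.List.pyGetD posgather (ipg.1 + 1) ("", 0)).1 " ")) then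
    (st.1 ++ [ipg.1], false)
  else if !st.2 then (st.1 ++ [ipg.1], true)
  else st

-- body of A's second loop (over zip(splits[:-1], splits[1:]))
def stepP (posgather : List (String × Int)) (acc : List (String × Int))
    (se : Int × Int) : List (String × Int) :=
  let start := se.1
  let stop := se.2
  if stop - start == 1 then
    -- posgather[start]: start is a valid index here
    acc ++ [PySem.List.pyGetD posgather start ("", 0)]
  else
    let ds_indexes := (PySem.List.pyRange start stop 1).foldl
      (fun ds pos_i =>
        if pvDeletedSymbols.contains (PySem.List.pyGetD posgather pos_i ("", 0)).1 then
          ds ++ [pos_i]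
        else ds) []
    if ds_indexes.length == 0 && decide (stop - start ≤ 2) then
      acc ++ PySem.List.slice posgather (some start) (some stop)
    else
      let pos :=
        if stop - start - (ds_indexes.length : Int) ≤ 1 then
          (if stop - start - (ds_indexes.length : Int) == 0 then "DEL"
           -- [...][0]: in Python guarded by the assert/branch condition (list has an element there)
           else (((PySem.List.slice posgather (some start) (some stop)).map Prod.fst).filter
                   (fun p => !pvDeletedSymbols.contains p)).headD "")
        else PySem.Int.toStr (stop - start - (ds_indexes.length : Int))
      let len_pos := ((PySem.List.slice posgather (some start) (some stop)).map Prod.snd).sum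
      acc ++ [(pos, len_pos)]

def posGatherStar_py (posgather : List (String × Int)) : List (String × Int) :=
  let splits := ((PySem.List.enumerate posgather).foldl (stepA posgather) ([], false)).1
                  ++ [(posgather.length : Int)]
  (List.zip splits.dropLast (splits.drop 1)).foldl (stepP posgather) []

-- ===== PORT B =====
-- is_boundary(i) of Source B
def pvIsBoundary (posgather : List (String × Int)) (i : Nat) : Bool :=
  let pos := (PySem.List.pyGetD posgather (i : Int) ("", 0)).1
  PySem.Str.isIn pos " " ||
    (PySem.Str.isIn pos ",." &&
      (((i : Int) + 1 == (posgather.length : Int)) ||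
       PySem.Str.isIn (PySem.List.pyGetD posgather ((i : Int) + 1) ("", 0)).1 " "))

-- emit(group) of Source B
def pvEmit (group : List (String × Int)) : List (String × Int) :=
  if group.length ≤ 2 then group
  else [(PySem.Int.toStr (group.length : Int), (group.map Prod.snd).sum)]

-- body of Source B's single loop; state = (out, group)
def stepB (posgather : List (String × Int))
    (st : List (String × Int) × List (String × Int)) (i : Nat) :
    List (String × Int) × List (String × Int) :=
  if pvIsBoundary posgather i then
    (st.1 ++ pvEmit st.2 ++ [PySem.List.pyGetD posgather (i : Int) ("", 0)], [])
  else
    (st.1, st.2 ++ [PySem.List.pyGetD posgather (i : Int) ("", 0)])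

def posGatherStar_py_alt (posgather : List (String × Int)) : List (String × Int) :=
  let res := (List.range posgather.length).foldl (stepB posgather) ([], [])
  res.1 ++ pvEmit res.2

-- ===== PRECONDITION & SPEC =====
def Spec_posGatherStar_py (posgather : List (String × Int)) (out : List (String × Int)) : Prop := out = posGatherStar_py_alt posgather
instance (posgather : List (String × Int)) (out : List (String × Int)) : Decidable (Spec_posGatherStar_py posgather out) := by unfold Spec_posGatherStar_py; infer_instance

-- ===== CLAIM (what is proved, stated in full; the proofs are below) =====
def Claim_equal_posGatherStar_py : Prop := ∀ (posgather : List (String × Int)), Dom_posGatherStar_py posgather → Spec_posGatherStar_py posgather (posGatherStar_py posgather)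

-- ===== LEMMAS AND PROOFS =====

-- Recursive model of B's single pass from index i with pending group g.
def pvG (pg : List (String × Int)) (i : Nat) (g : List (String × Int)) : List (String × Int) :=
  if h : i < pg.length then
    if pvIsBoundary pg i then pvEmit g ++ [pg[i]] ++ pvG pg (i + 1) []
    else pvG pg (i + 1) (g ++ [pg[i]])
  else pvEmit g
  termination_by pg.length - i

-- Recursive model of A's splits built from index i with bl_in_word = bl.
def pvS (pg : List (String × Int)) (i : Nat) (bl : Bool) : List Nat :=
  if h : i < pg.length then
    if pvIsBoundary pg i then i :: pvS pg (i + 1) false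
    else if !bl then i :: pvS pg (i + 1) true
    else pvS pg (i + 1) bl
  else []
  termination_by pg.length - i

-- A's second phase over consecutive pairs of a (Nat-level) splits list.
def pvJ (pg : List (String × Int)) : List Nat → List (String × Int)
  | [] => []
  | [_] => []
  | a :: b :: t => pvEmit ((pg.drop a).take (b - a)) ++ pvJ pg (b :: t)

theorem pvJ_cons (pg : List (String × Int)) (a : Nat) (L : List Nat) (hL : L ≠ []) :
    pvJ pg (a :: L) = pvEmit ((pg.drop a).take (L.headD 0 - a)) ++ pvJ pg L := by
  cases L with
  | nil => exact absurd rfl hL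
  | cons b t => rfl

theorem pv_cond_eq (pg : List (String × Int)) (i : Nat) (hi : i < pg.length) :
    (PySem.Str.isIn (pg[i].1) " " ||
      (PySem.Str.isIn (pg[i].1) ",." &&
        (((i : Int) + 1 == (pg.length : Int)) ||
         PySem.Str.isIn (PySem.List.pyGetD pg ((i : Int) + 1) ("", 0)).1 " ")))
    = pvIsBoundary pg i := by
  simp [pvIsBoundary, PySem.List.pyGetD_natCast, List.getD_eq_getElem?_getD,
    List.getElem?_eq_getElem hi]

-- membership in the empty deleted_symbols list is always false, so ds_indexes = []
theorem pv_ds_nil (pg : List (String × Int)) (l : List Int) (acc : List Int) :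
    l.foldl (fun ds pos_i =>
        if pvDeletedSymbols.contains (PySem.List.pyGetD pg pos_i ("", 0)).1 then
          ds ++ [pos_i]
        else ds) acc = acc := by
  induction l generalizing acc with
  | nil => rfl
  | cons x t ih => simp [pvDeletedSymbols]

theorem pv_stepP_pair (pg : List (String × Int)) (acc : List (String × Int))
    (a b : Nat) (hab : a < b) (hb : b ≤ pg.length) :
    stepP pg acc ((a : Int), (b : Int)) = acc ++ pvEmit ((pg.drop a).take (b - a)) := by
  have hba : (b : Int) - (a : Int) = ((b - a : Nat) : Int) := by omega
  have ha : a < pg.length := by omega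
  have hlen : ((pg.drop a).take (b - a)).length = b - a := by
    simp [List.length_take, List.length_drop]; omega
  have htake1 : List.take 1 (List.drop a pg) = [pg[a]] := by
    rw [List.drop_eq_getElem_cons ha]; rfl
  unfold stepP pvEmit
  simp only [hba, pv_ds_nil, PySem.List.slice_natCast, List.length_nil, Nat.cast_zero,
    Int.sub_zero, beq_iff_eq, true_and, Bool.and_eq_true, decide_eq_true_eq, hlen]
  split_ifs <;>
    first
      | rfl
      | (exfalso; omega)
      | (have h1 : b - a = 1 := by omega
         rw [h1, htake1]
         simp [PySem.List.pyGetD_natCast, List.getD_eq_getElem?_getD,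
           List.getElem?_eq_getElem ha])

theorem pv_foldB_inv (pg : List (String × Int)) :
    ∀ (k i : Nat), pg.length - i = k → i ≤ pg.length →
    ∀ (out g : List (String × Int)),
      (((List.range' i k).foldl (stepB pg) (out, g)).1
        ++ pvEmit ((List.range' i k).foldl (stepB pg) (out, g)).2)
      = out ++ pvG pg i g := by
  intro k
  induction k with
  | zero =>
    intro i hk hi out g
    have hni : ¬ i < pg.length := by omega
    rw [pvG]
    simp [List.range', hni]
  | succ k ih =>
    intro i hk hi out g
    have hilt : i < pg.length := by omega
    rw [List.range'_succ]
    rw [pvG]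
    simp only [List.foldl_cons, hilt, dif_pos]
    by_cases hb : pvIsBoundary pg i
    · rw [stepB, if_pos hb]
      rw [ih (i + 1) (by omega) (by omega)]
      simp [hb, PySem.List.pyGetD_natCast, List.getD_eq_getElem?_getD,
        List.getElem?_eq_getElem hilt]
    · rw [stepB, if_neg hb]
      rw [ih (i + 1) (by omega) (by omega)]
      simp [hb, PySem.List.pyGetD_natCast, List.getD_eq_getElem?_getD,
        List.getElem?_eq_getElem hilt]

theorem pv_foldA_inv (pg : List (String × Int)) :
    ∀ (k i : Nat), pg.length - i = k → i ≤ pg.length →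
    ∀ (acc : List Int) (bl : Bool),
      ((PySem.List.enumerate (pg.drop i) (i : Int)).foldl (stepA pg) (acc, bl)).1
        = acc ++ (pvS pg i bl).map (fun x => Int.ofNat x) := by
  intro k
  induction k with
  | zero =>
    intro i hk hi acc bl
    have hin : i = pg.length := by omega
    rw [pvS]
    simp [hin]
  | succ k ih =>
    intro i hk hi acc bl
    have hilt : i < pg.length := by omega
    rw [List.drop_eq_getElem_cons hilt, PySem.List.enumerate_cons]
    rw [pvS]
    simp only [List.foldl_cons, hilt, dif_pos]
    have hcast : (i : Int) + 1 = ((i + 1 : Nat) : Int) := by omega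
    have hc := pv_cond_eq pg i hilt
    by_cases hb : pvIsBoundary pg i
    · simp only [stepA, hc, hb, if_true]
      rw [hcast, ih (i + 1) (by omega) (by omega)]
      simp
    · simp only [stepA, hc, hb, Bool.false_eq_true, if_false]
      cases bl with
      | false =>
        simp only [Bool.not_false, if_true]
        rw [hcast, ih (i + 1) (by omega) (by omega)]
        simp
      | true =>
        simp only [Bool.not_true, Bool.false_eq_true, if_false]
        rw [hcast, ih (i + 1) (by omega) (by omega)]

theorem pvS_mem (pg : List (String × Int)) :
    ∀ (k i : Nat) (bl : Bool) (x : Nat), pg.length - i = k →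
      x ∈ pvS pg i bl → i ≤ x ∧ x < pg.length := by
  intro k
  induction k with
  | zero =>
    intro i bl x hk hx
    rw [pvS] at hx
    by_cases h : i < pg.length
    · omega
    · simp [h] at hx
  | succ k ih =>
    intro i bl x hk hx
    rw [pvS] at hx
    by_cases h : i < pg.length
    · simp only [h, dif_pos] at hx
      by_cases hb : pvIsBoundary pg i
      · simp only [hb, if_pos] at hx
        rcases List.mem_cons.1 hx with rfl | hx
        · omega
        · have := ih (i + 1) false x (by omega) hx; omega
      · simp only [hb, Bool.false_eq_true, if_false] at hx
        cases bl with
        | false =>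
          simp only [Bool.not_false, if_pos] at hx
          rcases List.mem_cons.1 hx with rfl | hx
          · omega
          · have := ih (i + 1) true x (by omega) hx; omega
        | true =>
          simp only [Bool.not_true, Bool.false_eq_true, if_false] at hx
          have := ih (i + 1) true x (by omega) hx; omega
    · simp [h] at hx

theorem pvS_chain (pg : List (String × Int)) :
    ∀ (k i : Nat) (bl : Bool), pg.length - i = k →
      List.IsChain (· < ·) (pvS pg i bl ++ [pg.length]) := by
  intro k
  induction k with
  | zero =>
    intro i bl hk
    rw [pvS]
    by_cases h : i < pg.length
    · omega
    · simp [h]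
  | succ k ih =>
    intro i bl hk
    have h : i < pg.length := by omega
    have hhead : ∀ (bl' : Bool), ∀ y ∈ (pvS pg (i + 1) bl' ++ [pg.length]).head?, i < y := by
      intro bl' y hy
      cases hS : pvS pg (i + 1) bl' with
      | nil => simp [hS] at hy; omega
      | cons z t =>
        simp [hS] at hy
        have := pvS_mem pg (pg.length - (i + 1)) (i + 1) bl' z rfl (by simp [hS])
        omega
    rw [pvS]
    simp only [h, dif_pos]
    by_cases hb : pvIsBoundary pg i
    · simp only [hb, if_pos, List.cons_append]
      exact (ih (i + 1) false (by omega)).cons (hhead false)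
    · simp only [hb, Bool.false_eq_true, if_false]
      cases bl with
      | false =>
        simp only [Bool.not_false, if_pos, List.cons_append]
        exact (ih (i + 1) true (by omega)).cons (hhead true)
      | true =>
        simp only [Bool.not_true, Bool.false_eq_true, if_false]
        exact ih (i + 1) true (by omega)

theorem pv_foldP_inv (pg : List (String × Int)) :
    ∀ (l : List Nat) (acc : List (String × Int)),
      List.IsChain (· < ·) l → (∀ x ∈ l, x ≤ pg.length) →
      (List.zip ((l.map (fun x => Int.ofNat x)).dropLast)
                ((l.map (fun x => Int.ofNat x)).drop 1)).foldl (stepP pg) acc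
        = acc ++ pvJ pg l := by
  intro l
  induction l with
  | nil => intro acc _ _; simp [pvJ]
  | cons a t ih =>
    intro acc hc hbnd
    cases t with
    | nil => simp [pvJ]
    | cons b t' =>
      have hab : a < b := (List.isChain_cons_cons.1 hc).1
      have hb : b ≤ pg.length := hbnd b (by simp)
      rw [List.map_cons, List.map_cons, List.dropLast_cons₂, List.drop_succ_cons,
        List.drop_zero, List.zip_cons_cons, List.foldl_cons]
      simp only [Int.ofNat_eq_natCast]
      rw [pv_stepP_pair pg acc a b hab hb]
      have := ih (acc ++ pvEmit ((pg.drop a).take (b - a))) (List.isChain_cons_cons.1 hc).2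
        (fun x hx => hbnd x (List.mem_cons_of_mem a hx))
      simp only [List.map_cons, List.drop_succ_cons, List.drop_zero,
        Int.ofNat_eq_natCast] at this
      rw [this, pvJ]
      simp

-- head of (pvS pg i false ++ [pg.length]) is i itself, for i ≤ length
theorem pvS_false_head (pg : List (String × Int)) (i : Nat) (hi : i ≤ pg.length) :
    (pvS pg i false ++ [pg.length]).headD 0 = i ∧ pvS pg i false ++ [pg.length] ≠ [] := by
  rw [pvS]
  by_cases h : i < pg.length
  · simp only [h, dif_pos]
    by_cases hb : pvIsBoundary pg i <;> simp [hb]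
  · have hin : i = pg.length := by omega
    subst hin
    simp

theorem pv_key (pg : List (String × Int)) :
    ∀ (k i : Nat), pg.length - i = k → i ≤ pg.length →
      (pvJ pg (pvS pg i false ++ [pg.length]) = pvG pg i []) ∧
      (∀ j, j ≤ i → pvJ pg (j :: (pvS pg i true ++ [pg.length]))
          = pvG pg i ((pg.drop j).take (i - j))) := by
  intro k
  induction k with
  | zero =>
    intro i hk hi
    have hin : i = pg.length := by omega
    subst hin
    constructor
    · rw [pvS, pvG]
      simp [pvJ, pvEmit]
    · intro j hj
      rw [pvS, pvG]
      simp [pvJ]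
  | succ k ih =>
    intro i hk hi
    have hilt : i < pg.length := by omega
    have ihn := ih (i + 1) (by omega) (by omega)
    have htake1 : (pg.drop i).take 1 = [pg[i]] := by
      rw [List.drop_eq_getElem_cons hilt]; rfl
    by_cases hb : pvIsBoundary pg i
    · -- boundary at i: it is its own segment
      have hJfalse : pvJ pg (i :: (pvS pg (i + 1) false ++ [pg.length]))
          = [pg[i]] ++ pvG pg (i + 1) [] := by
        obtain ⟨hhd, hne⟩ := pvS_false_head pg (i + 1) (by omega)
        rw [pvJ_cons pg i _ hne, hhd]
        have : i + 1 - i = 1 := by omega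
        rw [this, htake1, ihn.1]
        simp [pvEmit]
      constructor
      · rw [pvS, pvG]
        simp only [hilt, dif_pos, hb, if_pos, List.cons_append]
        rw [hJfalse]
        simp [pvEmit]
      · intro j hj
        rw [pvS, pvG]
        simp only [hilt, dif_pos, hb, if_pos, List.cons_append]
        rw [pvJ_cons pg j (i :: (pvS pg (i + 1) false ++ [pg.length])) (by simp)]
        simp only [List.headD_cons]
        rw [hJfalse]
        simp
    · -- content token at i
      constructor
      · rw [pvS, pvG]
        simp only [hilt, dif_pos, hb, Bool.false_eq_true, if_false, Bool.not_false, if_pos]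
        rw [List.cons_append, ihn.2 i (by omega)]
        have : i + 1 - i = 1 := by omega
        rw [this, htake1]
        simp
      · intro j hj
        rw [pvS, pvG]
        simp only [hilt, dif_pos, hb, Bool.false_eq_true, if_false, Bool.not_true]
        rw [ihn.2 j (by omega)]
        have hsucc : i + 1 - j = (i - j) + 1 := by omega
        have htk : (pg.drop j).take (i + 1 - j) = (pg.drop j).take (i - j) ++ [pg[i]] := by
          rw [hsucc, List.take_add_one]
          have : (pg.drop j)[i - j]? = some pg[i] := by
            rw [List.getElem?_drop]
            have : j + (i - j) = i := by omega
            rw [this, List.getElem?_eq_getElem hilt]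
          simp [this]
        rw [htk]

-- ===== VERDICT (by name: the statement is the Claim_ definition above) =====
theorem posGatherStar_py_spec : Claim_equal_posGatherStar_py := by
  intro pg _
  unfold Spec_posGatherStar_py posGatherStar_py posGatherStar_py_alt
  have hA : ((PySem.List.enumerate pg).foldl (stepA pg) ([], false)).1
      = (pvS pg 0 false).map (fun x => Int.ofNat x) := by
    have := pv_foldA_inv pg pg.length 0 (by omega) (by omega) [] false
    simpa using this
  rw [hA]
  have hsplit : ((pvS pg 0 false).map (fun x => Int.ofNat x)) ++ [(pg.length : Int)]
      = (pvS pg 0 false ++ [pg.length]).map (fun x => Int.ofNat x) := by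
    simp
  rw [hsplit]
  have hchain : List.IsChain (· < ·) (pvS pg 0 false ++ [pg.length]) :=
    pvS_chain pg pg.length 0 false (by omega)
  have hbnd : ∀ x ∈ pvS pg 0 false ++ [pg.length], x ≤ pg.length := by
    intro x hx
    rcases List.mem_append.1 hx with hx | hx
    · have := pvS_mem pg pg.length 0 false x (by omega) hx; omega
    · simp at hx; omega
  rw [pv_foldP_inv pg _ [] hchain hbnd]
  have hB := pv_foldB_inv pg pg.length 0 (by omega) (by omega) [] []
  rw [List.range_eq_range']
  rw [hB, (pv_key pg pg.length 0 (by omega) (by omega)).1]
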